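-- pv_equiv track=rewrite | github.com/adobe/Marinus | python3_cron_scripts/get_original_ct_logs.py | check_zone_relevancy
-- ===== SOURCE A (Python) =====
-- def check_zone_relevancy(cert, zones):
--     """
--     Find the related zones within the certificate
--     """
--     cert_zones = []
--
--     if "subject_common_names" in cert:
--         for cn in cert["subject_common_names"]:
--             for zone in zones:
--                 if cn == zone or cn.endswith("." + zone):
--                     if zone not in cert_zones:
--                         cert_zones.append(zone)
--
--     if "subject_dns_names" in cert:
--         for cn in cert["subject_dns_names"]:
--             for zone in zones:
--                 if cn == zone or cn.endswith("." + zone):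
--                     if zone not in cert_zones:
--                         cert_zones.append(zone)
--
--     return cert_zones
-- ===== SOURCE B (Python) =====
-- def check_zone_relevancy(cert, zones):
--     """
--     Find the related zones within the certificate.
--     Zone -> first-index map + suffix generation at dot boundaries:
--     each name is matched by dict lookups of its own suffixes instead of
--     a scan over all zones.
--     """
--     names = cert.get("subject_common_names", []) + cert.get("subject_dns_names", [])
--     if not names:
--         return []
--     first_idx = {}
--     for i, z in enumerate(zones):
--         if z not in first_idx:
--             first_idx[z] = i
--     seen = set()
--     result = []
--     for cn in names:
--         hits = []
--         for suf in _suffixes(cn):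
--             j = first_idx.get(suf)
--             if j is not None and j not in seen:
--                 seen.add(j)
--                 hits.append((j, suf))
--         hits.sort(key=lambda t: t[0])
--         result.extend(z for _, z in hits)
--     return result
--
-- def _suffixes(cn):
--     yield cn
--     for i, ch in enumerate(cn):
--         if ch == '.':
--             yield cn[i + 1:]
-- ===== Notes on version B (the rewrite author's own statement) =====
-- stated objective: alternative
-- what changed: Instead of scanning every zone per certificate name with string-suffix comparisons, B builds a zone-to-first-index dict once, generates each name's candidate suffixes at its dot boundaries, looks them up, and emits the per-name matches ordered by zone index (returning [] immediately when the cert has no names).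
import Mathlib
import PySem

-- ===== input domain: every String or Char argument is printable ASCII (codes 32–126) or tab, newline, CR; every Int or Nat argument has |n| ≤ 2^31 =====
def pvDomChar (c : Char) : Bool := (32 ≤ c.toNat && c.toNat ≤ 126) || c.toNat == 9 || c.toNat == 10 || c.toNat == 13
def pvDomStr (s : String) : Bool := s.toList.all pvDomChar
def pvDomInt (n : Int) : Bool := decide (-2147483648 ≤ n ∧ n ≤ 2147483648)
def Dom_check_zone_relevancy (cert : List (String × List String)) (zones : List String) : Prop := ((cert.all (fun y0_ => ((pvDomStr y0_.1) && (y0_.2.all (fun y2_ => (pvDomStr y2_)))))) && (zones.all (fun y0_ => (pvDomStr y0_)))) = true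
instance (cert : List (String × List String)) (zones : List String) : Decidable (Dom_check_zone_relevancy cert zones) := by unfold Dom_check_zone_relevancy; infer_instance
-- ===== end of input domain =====

-- B replaces A's scan of all zones per name by a zone → first-index map plus
-- dot-boundary suffix lookups (objective: alternative algorithm, same results).

-- ===== PORT A =====
def check_zone_relevancy (cert : List (String × List String)) (zones : List String) : List String :=
  let d := PySem.Dict.mk cert
  let cert_zones : List String := []
  let cert_zones :=
    if d.contains "subject_common_names" then
      (d.getD "subject_common_names" []).foldl (fun acc cn =>
        zones.foldl (fun acc zone =>
          if cn == zone || PySem.Str.endswith cn ("." ++ zone) then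
            (if !(acc.contains zone) then acc ++ [zone] else acc)
          else acc) acc) cert_zones
    else cert_zones
  let cert_zones :=
    if d.contains "subject_dns_names" then
      (d.getD "subject_dns_names" []).foldl (fun acc cn =>
        zones.foldl (fun acc zone =>
          if cn == zone || PySem.Str.endswith cn ("." ++ zone) then
            (if !(acc.contains zone) then acc ++ [zone] else acc)
          else acc) acc) cert_zones
    else cert_zones
  cert_zones

-- ===== PORT B =====
-- Source B's _suffixes generator: the suffix after each '.' of cn, in left-to-right order
def altDotSuffixes : List Char → List (List Char)
  | [] => []
  | c :: rest => (if c = '.' then [rest] else []) ++ altDotSuffixes rest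

def altSuffixes (cn : String) : List String :=
  cn :: (altDotSuffixes cn.toList).map (fun cs => String.ofList cs)

def check_zone_relevancy_alt (cert : List (String × List String)) (zones : List String) : List String :=
  let d := PySem.Dict.mk cert
  let names := d.getD "subject_common_names" [] ++ d.getD "subject_dns_names" []
  if names = [] then [] else
  let first_idx : PySem.Dict String Int :=
    (PySem.List.enumerate zones).foldl
      (fun d p => if !(d.contains p.2) then d.insert p.2 p.1 else d) PySem.Dict.empty
  let st := names.foldl (fun (st : PySem.Set Int × List String) cn =>
    let res := (altSuffixes cn).foldl
      (fun (p : PySem.Set Int × List (Int × String)) suf =>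
        match first_idx.get? suf with
        | some j => if !(PySem.Set.contains p.1 j) then (PySem.Set.add p.1 j, p.2 ++ [(j, suf)]) else p
        | none => p) (st.1, [])
    let hits := PySem.List.sorted res.2 (fun t => t.1) false
    (res.1, st.2 ++ hits.map (fun t => t.2))) (PySem.Set.empty, [])
  st.2

-- ===== PRECONDITION & SPEC =====
def Spec_check_zone_relevancy (cert : List (String × List String)) (zones : List String) (out : List String) : Prop := out = check_zone_relevancy_alt cert zones
instance (cert : List (String × List String)) (zones : List String) (out : List String) : Decidable (Spec_check_zone_relevancy cert zones out) := by unfold Spec_check_zone_relevancy; infer_instance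

-- ===== CLAIM (what is proved, stated in full; the proofs are below) =====
def Claim_equal_check_zone_relevancy : Prop := ∀ (cert : List (String × List String)) (zones : List String), Dom_check_zone_relevancy cert zones → Spec_check_zone_relevancy cert zones (check_zone_relevancy cert zones)

-- ===== LEMMAS AND PROOFS =====

-- A's match condition
def qm (cn z : String) : Bool := cn == z || PySem.Str.endswith cn ("." ++ z)

-- A's inner loop over zones (definitionally the loop body of port A)
def stepAfun (cn : String) (zones acc : List String) : List String :=
  zones.foldl (fun acc zone =>
    if cn == zone || PySem.Str.endswith cn ("." ++ zone) then
      (if !(acc.contains zone) then acc ++ [zone] else acc)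
    else acc) acc

-- B's zone → first-index dict (definitionally the first_idx of port B)
def FIdx (zones : List String) : PySem.Dict String Int :=
  (PySem.List.enumerate zones).foldl
    (fun d p => if !(d.contains p.2) then d.insert p.2 p.1 else d) PySem.Dict.empty

-- B's suffix loop body (fd abstracted; definitionally port B's inner fold step)
def stepHfun (fd : PySem.Dict String Int) (p : PySem.Set Int × List (Int × String)) (suf : String) :
    PySem.Set Int × List (Int × String) :=
  match fd.get? suf with
  | some j => if !(PySem.Set.contains p.1 j) then (PySem.Set.add p.1 j, p.2 ++ [(j, suf)]) else p
  | none => p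

-- B's per-name loop body (definitionally port B's outer fold step)
def stepBfun (fd : PySem.Dict String Int) (st : PySem.Set Int × List String) (cn : String) :
    PySem.Set Int × List String :=
  let res := (altSuffixes cn).foldl (stepHfun fd) (st.1, [])
  let hits := PySem.List.sorted res.2 (fun t => t.1) false
  (res.1, st.2 ++ hits.map (fun t => t.2))

-- canonical per-name hit list: (first index, zone) for each matching zone not already taken,
-- in ascending index order, indices offset by k
def fh (q : String → Bool) (sv : List String) : List String → Int → List (Int × String)
  | [], _ => []
  | z :: t, k => if q z && !(sv.contains z) then (k, z) :: fh q (sv ++ [z]) t (k + 1) else fh q sv t (k + 1)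

def hfun (fd : PySem.Dict String Int) (seen : PySem.Set Int) (y : String) : Option (Int × String) :=
  match fd.get? y with
  | some j => if j ∈ seen then none else some (j, y)
  | none => none

def InvP (zones : List String) (seen : PySem.Set Int) (result : List String) : Prop :=
  ∀ j : Int, j ∈ seen ↔ ∃ y ∈ result, (FIdx zones).get? y = some j

lemma fh_cons_pos (q : String → Bool) (sv : List String) (z : String) (t : List String) (k : Int)
    (h : (q z && !(sv.contains z)) = true) :
    fh q sv (z :: t) k = (k, z) :: fh q (sv ++ [z]) t (k + 1) := by
  simp only [fh, h, if_true]

lemma fh_cons_neg (q : String → Bool) (sv : List String) (z : String) (t : List String) (k : Int)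
    (h : (q z && !(sv.contains z)) = false) :
    fh q sv (z :: t) k = fh q sv t (k + 1) := by
  simp only [fh, h, Bool.false_eq_true, if_false]

lemma foldA_eq (cn : String) :
    ∀ (t acc : List String) (k : Int), stepAfun cn t acc = acc ++ (fh (qm cn) acc t k).map (·.2) := by
  intro t
  induction t with
  | nil => intro acc k; simp [stepAfun, fh]
  | cons z t ih =>
    intro acc k
    have hstep : stepAfun cn (z :: t) acc =
        stepAfun cn t (if qm cn z then (if !(acc.contains z) then acc ++ [z] else acc) else acc) := rfl
    rw [hstep]
    by_cases hq : qm cn z = true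
    · by_cases hc : acc.contains z = true
      · have hcond : (qm cn z && !(acc.contains z)) = false := by rw [hq, hc]; rfl
        rw [fh_cons_neg _ _ _ _ _ hcond, hq, hc]
        simpa using ih acc (k + 1)
      · have hcf : acc.contains z = false := by simpa using hc
        have hcond : (qm cn z && !(acc.contains z)) = true := by rw [hq, hcf]; rfl
        rw [fh_cons_pos _ _ _ _ _ hcond, hq, hcf]
        simp only [Bool.not_false, if_true, List.map_cons]
        rw [ih (acc ++ [z]) (k + 1)]
        simp
    · have hqf : qm cn z = false := by simpa using hq
      have hcond : (qm cn z && !(acc.contains z)) = false := by rw [hqf]; rfl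
      rw [fh_cons_neg _ _ _ _ _ hcond, hqf]
      simpa using ih acc (k + 1)

lemma fh_key_le (q : String → Bool) :
    ∀ (t sv : List String) (k : Int) (p : Int × String), p ∈ fh q sv t k → k ≤ p.1 := by
  intro t
  induction t with
  | nil => intro sv k p hp; simp [fh] at hp
  | cons z t ih =>
    intro sv k p hp
    by_cases h : (q z && !(sv.contains z)) = true
    · rw [fh_cons_pos q sv z t k h, List.mem_cons] at hp
      rcases hp with h1 | h2
      · subst h1; exact le_refl _
      · have := ih (sv ++ [z]) (k + 1) p h2; omega
    · rw [fh_cons_neg q sv z t k (by simpa using h)] at hp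
      have := ih sv (k + 1) p hp; omega

lemma fh_pairwise (q : String → Bool) :
    ∀ (t sv : List String) (k : Int), (fh q sv t k).Pairwise (fun a b => a.1 < b.1) := by
  intro t
  induction t with
  | nil => intro sv k; simp [fh]
  | cons z t ih =>
    intro sv k
    by_cases h : (q z && !(sv.contains z)) = true
    · rw [fh_cons_pos q sv z t k h]
      refine List.Pairwise.cons ?_ (ih (sv ++ [z]) (k + 1))
      intro p hp
      have := fh_key_le q t (sv ++ [z]) (k + 1) p hp
      simp only
      omega
    · rw [fh_cons_neg q sv z t k (by simpa using h)]
      exact ih sv (k + 1)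

lemma fh_nodup (q : String → Bool) (t sv : List String) (k : Int) : (fh q sv t k).Nodup :=
  (fh_pairwise q t sv k).imp (fun h heq => by rw [heq] at h; exact lt_irrefl _ h)

lemma mem_fh (q : String → Bool) :
    ∀ (t sv : List String) (k j : Int) (y : String),
      ((j, y) ∈ fh q sv t k ↔
        q y = true ∧ y ∉ sv ∧ ∃ n : Nat, PySem.List.index? t y = some n ∧ j = k + n) := by
  intro t
  induction t with
  | nil =>
    intro sv k j y
    constructor
    · intro h; exact absurd h (by simp [fh])
    · rintro ⟨-, -, n, hn, -⟩
      have hnone : PySem.List.index? ([] : List String) y = none := by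
        rw [PySem.List.index?_eq_none_iff]; simp
      rw [hnone] at hn
      cases hn
  | cons z t ih =>
    intro sv k j y
    by_cases hcond : (q z && !(sv.contains z)) = true
    · rw [fh_cons_pos q sv z t k hcond, List.mem_cons]
      have h' := hcond
      rw [Bool.and_eq_true] at h'
      obtain ⟨hqz, hcz⟩ := h'
      have hzsv : z ∉ sv := by
        intro hm; rw [List.contains_iff_mem.mpr hm] at hcz; simp at hcz
      by_cases hyz : y = z
      · subst hyz
        rw [PySem.List.index?_cons_self]
        constructor
        · rintro (h1 | h2)
          · have hjk : j = k := by
              have := congrArg Prod.fst h1; simpa using this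
            exact ⟨hqz, hzsv, 0, rfl, by omega⟩
          · exfalso
            exact ((ih (sv ++ [y]) (k + 1) j y).mp h2).2.1 (by simp)
        · rintro ⟨-, -, n, hn, hj⟩
          have hn0 : n = 0 := by injection hn with h'; omega
          subst hn0
          left
          have : j = k := by omega
          rw [this]
      · have hidx : PySem.List.index? (z :: t) y
            = Option.map (fun x => x + 1) (PySem.List.index? t y) :=
          PySem.List.index?_cons_of_ne t (fun he => hyz he.symm)
        have hsv : (y ∉ sv ++ [z]) ↔ y ∉ sv := by simp [hyz]
        constructor
        · rintro (h1 | h2)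
          · exfalso
            have := congrArg Prod.snd h1
            simp at this
            exact hyz this
          · obtain ⟨hq', hns, n, hn, hj⟩ := (ih (sv ++ [z]) (k + 1) j y).mp h2
            refine ⟨hq', hsv.mp hns, n + 1, ?_, ?_⟩
            · rw [hidx, hn]; rfl
            · push_cast
              omega
        · rintro ⟨hq', hns, n, hn, hj⟩
          rw [hidx] at hn
          cases hmem : PySem.List.index? t y with
          | none => rw [hmem] at hn; cases hn
          | some m =>
            rw [hmem] at hn
            have hn' : (some (m + 1) : Option Nat) = some n := hn
            have hnm : n = m + 1 := by injection hn' with h'; omega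
            subst hnm
            right
            refine (ih (sv ++ [z]) (k + 1) j y).mpr ⟨hq', hsv.mpr hns, m, hmem, ?_⟩
            push_cast at hj ⊢
            omega
    · have hcf : (q z && !(sv.contains z)) = false := by simpa using hcond
      rw [fh_cons_neg q sv z t k hcf]
      have hcase : q z = false ∨ z ∈ sv := by
        by_cases hq : q z = true
        · right
          rw [hq] at hcf
          simp only [Bool.true_and, Bool.not_eq_false'] at hcf
          exact List.contains_iff_mem.mp hcf
        · left; simpa using hq
      by_cases hyz : y = z
      · subst hyz
        constructor
        · intro hmem
          obtain ⟨hq', hns, -⟩ := (ih sv (k + 1) j y).mp hmem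
          exfalso
          rcases hcase with hc | hc
          · rw [hq'] at hc; cases hc
          · exact hns hc
        · rintro ⟨hq', hns, -⟩
          exfalso
          rcases hcase with hc | hc
          · rw [hq'] at hc; cases hc
          · exact hns hc
      · have hidx : PySem.List.index? (z :: t) y
            = Option.map (fun x => x + 1) (PySem.List.index? t y) :=
          PySem.List.index?_cons_of_ne t (fun he => hyz he.symm)
        rw [ih sv (k + 1) j y, hidx]
        constructor
        · rintro ⟨hq', hns, n, hn, hj⟩
          refine ⟨hq', hns, n + 1, by rw [hn]; rfl, by push_cast at hj ⊢; omega⟩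
        · rintro ⟨hq', hns, n, hn, hj⟩
          cases hmem : PySem.List.index? t y with
          | none => rw [hmem] at hn; cases hn
          | some m =>
            rw [hmem] at hn
            have hn' : (some (m + 1) : Option Nat) = some n := hn
            have hnm : n = m + 1 := by injection hn' with h'; omega
            subst hnm
            exact ⟨hq', hns, m, rfl, by push_cast at hj ⊢; omega⟩

lemma fidx_step_get? :
    ∀ (zs : List String) (s : Int) (d : PySem.Dict String Int) (z : String),
      ((PySem.List.enumerate zs s).foldl
        (fun d p => if !(d.contains p.2) then d.insert p.2 p.1 else d) d).get? z
      = if d.contains z then d.get? z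
        else (PySem.List.index? zs z).map (fun n : Nat => s + (n : Int)) := by
  intro zs
  induction zs with
  | nil =>
    intro s d z
    simp only [PySem.List.enumerate_nil, List.foldl_nil]
    have hnone : PySem.List.index? ([] : List String) z = none := by
      rw [PySem.List.index?_eq_none_iff]; simp
    rw [hnone]
    by_cases h : d.contains z = true
    · rw [if_pos h]
    · have hf : d.contains z = false := by simpa using h
      rw [if_neg (by simp [hf])]
      have hgn : d.get? z = none := by
        rw [PySem.Dict.get?_eq_none_iff_not_mem_keys]
        intro hk
        rw [← PySem.Dict.contains_iff_mem_keys] at hk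
        rw [hk] at hf
        cases hf
      rw [hgn]
      rfl
  | cons z0 zs ih =>
    intro s d z
    rw [PySem.List.enumerate_cons, List.foldl_cons]
    by_cases h0 : d.contains z0 = true
    · rw [show (if !(d.contains z0) then d.insert z0 s else d) = d by rw [h0]; rfl]
      rw [ih (s + 1) d z]
      by_cases hz : d.contains z = true
      · rw [if_pos hz, if_pos hz]
      · have hzf : d.contains z = false := by simpa using hz
        rw [if_neg hz, if_neg hz]
        have hne : z0 ≠ z := by
          intro he; rw [he] at h0; rw [h0] at hzf; cases hzf
        rw [PySem.List.index?_cons_of_ne zs hne]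
        cases hmi : PySem.List.index? zs z with
        | none => rfl
        | some m =>
          simp only [Option.map_some]
          congr 1
          push_cast
          ring
    · have h0f : d.contains z0 = false := by simpa using h0
      rw [show (if !(d.contains z0) then d.insert z0 s else d) = d.insert z0 s by rw [h0f]; rfl]
      rw [ih (s + 1) (d.insert z0 s) z]
      by_cases hz : z = z0
      · subst hz
        rw [if_pos (by rw [PySem.Dict.contains_insert]; simp)]
        rw [PySem.Dict.get?_insert, if_pos rfl, if_neg (by rw [h0f]; simp)]
        rw [PySem.List.index?_cons_self]
        simp
      · rw [PySem.Dict.contains_insert, PySem.Dict.get?_insert,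
          show (z == z0) = false by simp [hz], if_neg hz]
        simp only [Bool.false_or]
        by_cases hc : d.contains z = true
        · rw [if_pos hc, if_pos hc]
        · rw [if_neg hc, if_neg hc]
          rw [PySem.List.index?_cons_of_ne zs (fun he => hz he.symm)]
          cases hmi : PySem.List.index? zs z with
          | none => rfl
          | some m =>
            simp only [Option.map_some]
            congr 1
            push_cast
            ring

lemma fidx_get? (zones : List String) (z : String) :
    (FIdx zones).get? z = (PySem.List.index? zones z).map (fun n : Nat => (n : Int)) := by
  rw [FIdx, fidx_step_get? zones 0 PySem.Dict.empty z,
    if_neg (by rw [PySem.Dict.contains_empty]; simp)]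
  cases hmi : PySem.List.index? zones z with
  | none => rfl
  | some m => simp

lemma fidx_inj (zones : List String) {y y' : String} {j : Int}
    (h1 : (FIdx zones).get? y = some j) (h2 : (FIdx zones).get? y' = some j) : y = y' := by
  rw [fidx_get?] at h1 h2
  cases hm1 : PySem.List.index? zones y with
  | none => rw [hm1] at h1; cases h1
  | some n =>
    cases hm2 : PySem.List.index? zones y' with
    | none => rw [hm2] at h2; cases h2
    | some n' =>
      rw [hm1] at h1; rw [hm2] at h2
      simp only [Option.map_some, Option.some.injEq] at h1 h2
      have hnn : n = n' := by omega
      subst hnn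
      obtain ⟨hk1, he1, -⟩ := PySem.List.getElem_of_index?_eq_some hm1
      obtain ⟨hk2, he2, -⟩ := PySem.List.getElem_of_index?_eq_some hm2
      rw [← he1, ← he2]

lemma mem_altDotSuffixes : ∀ (l s : List Char), s ∈ altDotSuffixes l ↔ ('.' :: s) <:+ l := by
  intro l
  induction l with
  | nil => intro s; simp [altDotSuffixes]
  | cons c rest ih =>
    intro s
    simp only [altDotSuffixes, List.mem_append]
    rw [List.suffix_cons_iff, ih]
    constructor
    · rintro (h1 | h2)
      · by_cases hc : c = '.'
        · simp [hc] at h1; subst h1; subst hc; exact Or.inl rfl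
        · simp [hc] at h1
      · exact Or.inr h2
    · rintro (h1 | h2)
      · left
        injection h1 with hc hs
        subst hc
        simp [hs.symm]
      · exact Or.inr h2

lemma mem_altSuffixes (cn y : String) : y ∈ altSuffixes cn ↔ qm cn y = true := by
  have hdot : ("." ++ y).toList = '.' :: y.toList := by
    rw [String.toList_append]; rfl
  simp only [altSuffixes, List.mem_cons, List.mem_map, qm, Bool.or_eq_true, beq_iff_eq,
    PySem.Str.endswith_eq, PySem.Chars.endswith_iff, hdot]
  constructor
  · rintro (h1 | ⟨cs, hcs, hy⟩)
    · exact Or.inl h1.symm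
    · right
      have : y.toList = cs := by rw [← hy]; simp
      rw [this]
      exact (mem_altDotSuffixes cn.toList cs).mp hcs
  · rintro (h1 | h2)
    · exact Or.inl h1.symm
    · right
      exact ⟨y.toList, (mem_altDotSuffixes cn.toList y.toList).mpr h2, by simp⟩

lemma altDotSuffixes_lt : ∀ (l : List Char), ∀ s ∈ altDotSuffixes l, s.length < l.length := by
  intro l
  induction l with
  | nil => intro s hs; simp [altDotSuffixes] at hs
  | cons c rest ih =>
    intro s hs
    simp only [altDotSuffixes, List.mem_append] at hs
    rcases hs with h1 | h2
    · by_cases hc : c = '.'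
      · simp [hc] at h1; subst h1; simp
      · simp [hc] at h1
    · have := ih s h2; simp; omega

lemma nodup_altSuffixes (cn : String) : (altSuffixes cn).Nodup := by
  have hmapnd : ((altDotSuffixes cn.toList).map (fun cs => String.ofList cs)).Nodup := by
    apply List.Nodup.map
    · intro a b hab
      have := congrArg String.toList hab
      simpa using this
    · have hp : ∀ (l : List Char), (altDotSuffixes l).Pairwise (fun a b => b.length < a.length) := by
        intro l
        induction l with
        | nil => simp [altDotSuffixes]
        | cons c rest ih =>
          simp only [altDotSuffixes]
          by_cases hc : c = '.'
          · rw [hc, if_pos rfl, List.singleton_append]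
            refine List.Pairwise.cons ?_ ih
            intro s hs
            exact altDotSuffixes_lt rest s hs
          · simp [hc, ih]
      exact (hp cn.toList).imp (fun h heq => by rw [heq] at h; exact lt_irrefl _ h)
  refine List.nodup_cons.mpr ⟨?_, hmapnd⟩
  intro hmem
  obtain ⟨cs, hcs, hy⟩ := List.mem_map.mp hmem
  have hlen : cs.length < cn.toList.length := altDotSuffixes_lt cn.toList cs hcs
  have : cn.toList = cs := by rw [← hy]; simp
  rw [this] at hlen
  omega

lemma hfun_spec (fd : PySem.Dict String Int) (seen : PySem.Set Int) (y0 : String) (j : Int)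
    (y : String) (hb : hfun fd seen y0 = some (j, y)) :
    y0 = y ∧ fd.get? y0 = some j ∧ j ∉ seen := by
  cases hg : fd.get? y0 with
  | none =>
    have hb' : hfun fd seen y0 = none := by unfold hfun; rw [hg]
    rw [hb'] at hb
    cases hb
  | some j' =>
    by_cases h : j' ∈ seen
    · have hb' : hfun fd seen y0 = none := by
        unfold hfun; rw [hg]
        show (if j' ∈ seen then (none : Option (Int × String)) else some (j', y0)) = none
        rw [if_pos h]
      rw [hb'] at hb
      cases hb
    · have hb' : hfun fd seen y0 = some (j', y0) := by
        unfold hfun; rw [hg]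
        show (if j' ∈ seen then (none : Option (Int × String)) else some (j', y0)) = some (j', y0)
        rw [if_neg h]
      rw [hb'] at hb
      injection hb with h2
      injection h2 with hj hy
      refine ⟨hy, ?_, ?_⟩
      · rw [hj]
      · rw [← hj]; exact h

lemma filterMap_nodup (fd : PySem.Dict String Int) (seen : PySem.Set Int) (S : List String)
    (hS : S.Nodup) : (S.filterMap (hfun fd seen)).Nodup := by
  apply List.Nodup.filterMap _ hS
  intro a a' b hb hb'
  obtain ⟨j, y⟩ := b
  have h1 := (hfun_spec fd seen a j y (Option.mem_def.mp hb)).1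
  have h2 := (hfun_spec fd seen a' j y (Option.mem_def.mp hb')).1
  rw [h1, h2]

lemma mem_filterMap_hfun (fd : PySem.Dict String Int) (seen : PySem.Set Int) (S : List String)
    (j : Int) (y : String) :
    (j, y) ∈ S.filterMap (hfun fd seen) ↔ y ∈ S ∧ fd.get? y = some j ∧ j ∉ seen := by
  rw [List.mem_filterMap]
  constructor
  · rintro ⟨y0, hy0, hf⟩
    obtain ⟨he, hg, hns⟩ := hfun_spec fd seen y0 j y hf
    rw [he] at hy0 hg
    exact ⟨hy0, hg, hns⟩
  · rintro ⟨hy, hg, hns⟩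
    refine ⟨y, hy, ?_⟩
    unfold hfun
    rw [hg]
    show (if j ∈ seen then (none : Option (Int × String)) else some (j, y)) = some (j, y)
    rw [if_neg hns]

lemma hits_spec (fd : PySem.Dict String Int)
    (hinj : ∀ {y y' : String} {j : Int}, fd.get? y = some j → fd.get? y' = some j → y = y') :
    ∀ (S : List String), S.Nodup → ∀ (seen : PySem.Set Int) (hs : List (Int × String)),
      (S.foldl (stepHfun fd) (seen, hs)).2 = hs ++ S.filterMap (hfun fd seen)
      ∧ ∀ i : Int, i ∈ (S.foldl (stepHfun fd) (seen, hs)).1 ↔ i ∈ seen ∨ ∃ y ∈ S, fd.get? y = some i := by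
  intro S
  induction S with
  | nil => intro _ seen hs; simp
  | cons y S ih =>
    intro hnd seen hs
    have hndS : S.Nodup := (List.nodup_cons.mp hnd).2
    have hyS : y ∉ S := (List.nodup_cons.mp hnd).1
    rw [List.foldl_cons]
    cases hg : fd.get? y with
    | none =>
      have hstep : stepHfun fd (seen, hs) y = (seen, hs) := by
        unfold stepHfun; rw [hg]
      have hf : hfun fd seen y = none := by unfold hfun; rw [hg]
      rw [hstep]
      obtain ⟨ih1, ih2⟩ := ih hndS seen hs
      refine ⟨?_, ?_⟩
      · rw [ih1, List.filterMap_cons, hf]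
      · intro i
        rw [ih2 i]
        constructor
        · rintro (h | ⟨y', hy', hgy'⟩)
          · exact Or.inl h
          · exact Or.inr ⟨y', List.mem_cons_of_mem _ hy', hgy'⟩
        · rintro (h | ⟨y', hy', hgy'⟩)
          · exact Or.inl h
          · rcases List.mem_cons.mp hy' with he | hm
            · subst he; rw [hgy'] at hg; cases hg
            · exact Or.inr ⟨y', hm, hgy'⟩
    | some j =>
      by_cases hseen : j ∈ seen
      · have hct : PySem.Set.contains seen j = true := List.contains_iff_mem.mpr hseen
        have hstep : stepHfun fd (seen, hs) y = (seen, hs) := by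
          unfold stepHfun; rw [hg]
          show (if (!(PySem.Set.contains seen j)) = true
              then (PySem.Set.add seen j, hs ++ [(j, y)]) else (seen, hs)) = (seen, hs)
          rw [hct]
          rfl
        have hf : hfun fd seen y = none := by
          unfold hfun; rw [hg]
          show (if j ∈ seen then (none : Option (Int × String)) else some (j, y)) = none
          rw [if_pos hseen]
        rw [hstep]
        obtain ⟨ih1, ih2⟩ := ih hndS seen hs
        refine ⟨?_, ?_⟩
        · rw [ih1, List.filterMap_cons, hf]
        · intro i
          rw [ih2 i]
          constructor
          · rintro (h | ⟨y', hy', hgy'⟩)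
            · exact Or.inl h
            · exact Or.inr ⟨y', List.mem_cons_of_mem _ hy', hgy'⟩
          · rintro (h | ⟨y', hy', hgy'⟩)
            · exact Or.inl h
            · rcases List.mem_cons.mp hy' with he | hm
              · subst he
                rw [hgy'] at hg
                injection hg with he'
                exact Or.inl (he' ▸ hseen)
              · exact Or.inr ⟨y', hm, hgy'⟩
      · have hcf : PySem.Set.contains seen j = false := by
          by_cases hb : seen.contains j = true
          · exact absurd (List.contains_iff_mem.mp hb) hseen
          · exact (by simpa using hb : seen.contains j = false)
        have hstep : stepHfun fd (seen, hs) y = (PySem.Set.add seen j, hs ++ [(j, y)]) := by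
          unfold stepHfun; rw [hg]
          show (if (!(PySem.Set.contains seen j)) = true
              then (PySem.Set.add seen j, hs ++ [(j, y)]) else (seen, hs))
              = (PySem.Set.add seen j, hs ++ [(j, y)])
          rw [hcf]
          rfl
        have hf : hfun fd seen y = some (j, y) := by
          unfold hfun; rw [hg]
          show (if j ∈ seen then (none : Option (Int × String)) else some (j, y)) = some (j, y)
          rw [if_neg hseen]
        rw [hstep]
        obtain ⟨ih1, ih2⟩ := ih hndS (PySem.Set.add seen j) (hs ++ [(j, y)])
        refine ⟨?_, ?_⟩
        · rw [ih1]
          have hcong : S.filterMap (hfun fd (PySem.Set.add seen j)) = S.filterMap (hfun fd seen) := by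
            apply List.filterMap_congr
            intro y' hy'
            show (match fd.get? y' with
              | some j' => if j' ∈ PySem.Set.add seen j then none else some (j', y')
              | none => none)
              = (match fd.get? y' with
              | some j' => if j' ∈ seen then none else some (j', y')
              | none => none)
            cases hg' : fd.get? y' with
            | none => rfl
            | some j' =>
              have hjj : ¬ (j' = j) := by
                intro he; subst he
                exact hyS ((hinj hg' hg) ▸ hy')
              have hiff : (j' ∈ PySem.Set.add seen j) ↔ j' ∈ seen := by
                rw [PySem.Set.mem_add]
                constructor
                · rintro (h | h)
                  · exact h
                  · exact absurd h hjj
                · exact Or.inl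
              show (if j' ∈ PySem.Set.add seen j then (none : Option (Int × String)) else some (j', y'))
                  = (if j' ∈ seen then none else some (j', y'))
              exact if_congr hiff rfl rfl
          rw [hcong, List.filterMap_cons, hf, List.append_assoc, List.singleton_append]
        · intro i
          rw [ih2 i, PySem.Set.mem_add]
          constructor
          · rintro ((h | h) | ⟨y', hy', hgy'⟩)
            · exact Or.inl h
            · exact Or.inr ⟨y, List.mem_cons_self, by rw [hg, h]⟩
            · exact Or.inr ⟨y', List.mem_cons_of_mem _ hy', hgy'⟩
          · rintro (h | ⟨y', hy', hgy'⟩)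
            · exact Or.inl (Or.inl h)
            · rcases List.mem_cons.mp hy' with he | hm
              · subst he
                rw [hgy'] at hg
                injection hg with he'
                exact Or.inl (Or.inr he')
              · exact Or.inr ⟨y', hm, hgy'⟩

lemma stepB_hits (zones : List String) (cn : String) (seen : PySem.Set Int) (result : List String)
    (hInv : InvP zones seen result) :
    PySem.List.sorted ((altSuffixes cn).foldl (stepHfun (FIdx zones)) (seen, ([] : List (Int × String)))).2
      (fun t => t.1) false = fh (qm cn) result zones 0 := by
  obtain ⟨h2, -⟩ := hits_spec (FIdx zones) (fun h h' => fidx_inj zones h h')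
    (altSuffixes cn) (nodup_altSuffixes cn) seen []
  rw [h2, List.nil_append]
  apply PySem.List.sorted_eq_of_perm_of_pairwise_lt
  · rw [List.perm_ext_iff_of_nodup (fh_nodup _ _ _ _)
      (filterMap_nodup (FIdx zones) seen (altSuffixes cn) (nodup_altSuffixes cn))]
    rintro ⟨j, y⟩
    rw [mem_fh, mem_filterMap_hfun, mem_altSuffixes]
    constructor
    · rintro ⟨hq, hns, n, hn, hj⟩
      have hg : (FIdx zones).get? y = some j := by
        rw [fidx_get?, hn]
        simp only [Option.map_some, Option.some.injEq]
        omega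
      refine ⟨hq, hg, ?_⟩
      intro hseen
      obtain ⟨y', hy', hg'⟩ := (hInv j).mp hseen
      exact hns ((fidx_inj zones hg hg') ▸ hy')
    · rintro ⟨hq, hg, hns⟩
      rw [fidx_get?] at hg
      cases hm : PySem.List.index? zones y with
      | none => rw [hm] at hg; cases hg
      | some n =>
        rw [hm] at hg
        simp only [Option.map_some, Option.some.injEq] at hg
        refine ⟨hq, ?_, n, rfl, by omega⟩
        intro hmem
        apply hns
        apply (hInv j).mpr
        refine ⟨y, hmem, ?_⟩
        rw [fidx_get?, hm]
        simp only [Option.map_some, Option.some.injEq]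
        omega
  · exact fh_pairwise _ _ _ _

lemma outer (zones : List String) :
    ∀ (names : List String) (seen : PySem.Set Int) (result : List String), InvP zones seen result →
      (names.foldl (stepBfun (FIdx zones)) (seen, result)).2
        = names.foldl (fun acc cn => stepAfun cn zones acc) result := by
  intro names
  induction names with
  | nil => intro seen result _; rfl
  | cons cn names ih =>
    intro seen result hInv
    rw [List.foldl_cons, List.foldl_cons]
    have hstep : stepBfun (FIdx zones) (seen, result) cn
        = (((altSuffixes cn).foldl (stepHfun (FIdx zones)) (seen, [])).1,
           result ++ (PySem.List.sorted ((altSuffixes cn).foldl (stepHfun (FIdx zones)) (seen, [])).2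
             (fun t => t.1) false).map (fun t => t.2)) := rfl
    rw [hstep, stepB_hits zones cn seen result hInv]
    have hA : stepAfun cn zones result
        = result ++ (fh (qm cn) result zones 0).map (fun t => t.2) := foldA_eq cn zones result 0
    rw [hA]
    apply ih
    obtain ⟨-, hseen⟩ := hits_spec (FIdx zones) (fun h h' => fidx_inj zones h h')
      (altSuffixes cn) (nodup_altSuffixes cn) seen []
    intro j
    rw [hseen j]
    constructor
    · rintro (h | ⟨y, hy, hg⟩)
      · obtain ⟨y', hy', hg'⟩ := (hInv j).mp h
        exact ⟨y', List.mem_append_left _ hy', hg'⟩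
      · by_cases hmem : y ∈ result
        · exact ⟨y, List.mem_append_left _ hmem, hg⟩
        · refine ⟨y, List.mem_append_right _ ?_, hg⟩
          rw [fidx_get?] at hg
          cases hm : PySem.List.index? zones y with
          | none => rw [hm] at hg; cases hg
          | some n =>
            rw [hm] at hg
            simp only [Option.map_some, Option.some.injEq] at hg
            apply List.mem_map.mpr
            refine ⟨(j, y), ?_, rfl⟩
            rw [mem_fh]
            exact ⟨(mem_altSuffixes cn y).mp hy, hmem, n, hm, by omega⟩
    · rintro ⟨y, hy, hg⟩
      rcases List.mem_append.mp hy with hm | hm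
      · exact Or.inl ((hInv j).mpr ⟨y, hm, hg⟩)
      · obtain ⟨⟨j', y'⟩, hjy, he⟩ := List.mem_map.mp hm
        simp only at he
        subst he
        obtain ⟨hq, -, n, hn, hj'⟩ := (mem_fh (qm cn) zones result 0 j' y').mp hjy
        exact Or.inr ⟨y', (mem_altSuffixes cn y').mpr hq, hg⟩

lemma guard_fold (d : PySem.Dict String (List String)) (key : String)
    (f : List String → String → List String) (acc : List String) :
    (if d.contains key then (d.getD key []).foldl f acc else acc) = (d.getD key []).foldl f acc := by
  by_cases h : d.contains key = true
  · rw [if_pos h]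
  · have hf : d.contains key = false := by simpa using h
    rw [if_neg (by simp [hf]), PySem.Dict.getD_of_not_contains d [] hf]
    rfl

-- ===== VERDICT (by name: the statement is the Claim_ definition above) =====
theorem check_zone_relevancy_spec : Claim_equal_check_zone_relevancy := by
  intro cert zones _
  show check_zone_relevancy cert zones = check_zone_relevancy_alt cert zones
  have e1 : check_zone_relevancy cert zones =
      (if (PySem.Dict.mk cert).contains "subject_dns_names" then
          ((PySem.Dict.mk cert).getD "subject_dns_names" []).foldl (fun acc cn => stepAfun cn zones acc)
            (if (PySem.Dict.mk cert).contains "subject_common_names" then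
              ((PySem.Dict.mk cert).getD "subject_common_names" []).foldl
                (fun acc cn => stepAfun cn zones acc) [] else [])
        else (if (PySem.Dict.mk cert).contains "subject_common_names" then
              ((PySem.Dict.mk cert).getD "subject_common_names" []).foldl
                (fun acc cn => stepAfun cn zones acc) [] else [])) := rfl
  have e2 : check_zone_relevancy_alt cert zones =
      (if ((PySem.Dict.mk cert).getD "subject_common_names" []
            ++ (PySem.Dict.mk cert).getD "subject_dns_names" []) = [] then []
       else (((PySem.Dict.mk cert).getD "subject_common_names" []
          ++ (PySem.Dict.mk cert).getD "subject_dns_names" []).foldl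
            (stepBfun (FIdx zones)) (PySem.Set.empty, [])).2) := rfl
  have hInv0 : InvP zones PySem.Set.empty [] := by
    intro j
    constructor
    · intro h; exact absurd h (by simp [PySem.Set.empty])
    · rintro ⟨y, hy, -⟩; cases hy
  rw [e1, e2]
  by_cases hn : ((PySem.Dict.mk cert).getD "subject_common_names" []
      ++ (PySem.Dict.mk cert).getD "subject_dns_names" []) = []
  · rw [if_pos hn]
    obtain ⟨h1, h2⟩ := List.append_eq_nil_iff.mp hn
    simp only [guard_fold]
    rw [h1, h2]
    rfl
  · rw [if_neg hn, outer zones _ PySem.Set.empty [] hInv0, List.foldl_append]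
    simp only [guard_fold]
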